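-- pv_equiv track=rewrite | github.com/cristearadu02/Python-Laboratories | Week2/main.py | find_obstructed_seats
-- ===== SOURCE A (Python) =====
-- def find_obstructed_seats(matrix):
--     obstructed_seats = []
--     rows = len(matrix)
--     cols = len(matrix[0])
--
--     for row in range(rows):
--         for col in range(cols):
--             current_height = matrix[row][col]
--
--             # Check if there is a taller spectator in front
--             obstructed = False
--             for r in range(row + 1, rows):
--                 if matrix[r][col] > current_height:
--                     obstructed = True
--                     break
--
--             if obstructed:
--                 obstructed_seats.append((row, col))
--
--     return obstructed_seats
-- ===== SOURCE B (Python) =====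
-- def find_obstructed_seats(matrix):
--     # Bottom-up sweep maintaining per-column running max of rows below; O(rows*cols).
--     cols = len(matrix[0])
--     max_below = [None] * cols
--     chunks = []
--     for ri in range(len(matrix) - 1, -1, -1):
--         row = matrix[ri]
--         chunks.append([(ri, c) for c in range(cols)
--                        if max_below[c] is not None and max_below[c] > row[c]])
--         for c in range(cols):
--             if max_below[c] is None or row[c] > max_below[c]:
--                 max_below[c] = row[c]
--     return [seat for chunk in reversed(chunks) for seat in chunk]
-- ===== Notes on version B (the rewrite author's own statement) =====
-- stated objective: faster
-- what changed: Replaced the per-seat downward scan (for every seat, rescan all rows below it) by a single bottom-up sweep that maintains a per-column running maximum of the rows below, emitting each row's obstructed seats from that array.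
import Mathlib
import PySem

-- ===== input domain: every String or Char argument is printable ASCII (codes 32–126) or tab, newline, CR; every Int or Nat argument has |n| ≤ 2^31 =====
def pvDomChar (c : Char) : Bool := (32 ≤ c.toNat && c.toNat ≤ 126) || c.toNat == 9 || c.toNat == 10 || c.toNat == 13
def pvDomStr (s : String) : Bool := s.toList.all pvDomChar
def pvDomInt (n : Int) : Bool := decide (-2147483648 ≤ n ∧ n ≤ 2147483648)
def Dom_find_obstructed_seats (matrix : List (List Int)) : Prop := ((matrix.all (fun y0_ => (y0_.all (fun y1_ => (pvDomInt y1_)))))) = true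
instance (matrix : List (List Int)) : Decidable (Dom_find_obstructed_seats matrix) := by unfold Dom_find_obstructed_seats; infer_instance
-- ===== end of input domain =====

-- B replaces A's per-seat rescan of all rows below by one bottom-up sweep keeping a
-- per-column running maximum of the rows below (asymptotically faster).

-- ===== PORT A =====
-- the 'for r in range(row+1, rows): if matrix[r][col] > h: obstructed = True; break' loop
def checkA (matrix : List (List Int)) (h : Int) (c : Nat) : List Nat → Bool
  | [] => false
  | r :: rest => if (matrix.getD r []).getD c 0 > h then true else checkA matrix h c rest

def find_obstructed_seats (matrix : List (List Int)) : List (Int × Int) :=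
  let rows := matrix.length
  let cols := (matrix.getD 0 []).length
  (List.range rows).foldl (fun acc row =>
    (List.range cols).foldl (fun acc2 col =>
      let h := (matrix.getD row []).getD col 0
      if checkA matrix h col ((List.range rows).drop (row + 1))
      then acc2 ++ [((row : Int), (col : Int))] else acc2) acc) []

-- ===== PORT B =====
-- processes the rows from the bottom up (the structural recursion reaches the last row
-- first); returns (obstructed seats of this suffix, per-column max of this suffix)
def bRec (cols : Nat) (ri : Nat) : List (List Int) → List (Int × Int) × List (Option Int)
  | [] => ([], List.replicate cols none)
  | row :: rest =>
    let p := bRec cols (ri + 1) rest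
    let chunk := (List.range cols).filterMap (fun c =>
      match p.2.getD c none with
      | some m => if m > row.getD c 0 then some ((ri : Int), (c : Int)) else none
      | none => none)
    let maxb := (List.range cols).map (fun c =>
      match p.2.getD c none with
      | none => some (row.getD c 0)
      | some m => if row.getD c 0 > m then some (row.getD c 0) else some m)
    (chunk ++ p.1, maxb)

def find_obstructed_seats_alt (matrix : List (List Int)) : List (Int × Int) :=
  let cols := (matrix.getD 0 []).length
  (bRec cols 0 matrix).1

-- ===== PRECONDITION & SPEC =====
-- Pre_ excludes exactly the inputs where Python A raises IndexError: the empty matrix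
-- (matrix[0]) and ragged matrices where some row is shorter than the first row (matrix[r][col]).
def Pre_find_obstructed_seats (matrix : List (List Int)) : Prop :=
  matrix ≠ [] ∧ ∀ row ∈ matrix, (matrix.headI).length ≤ row.length
instance (matrix : List (List Int)) : Decidable (Pre_find_obstructed_seats matrix) := by
  unfold Pre_find_obstructed_seats; infer_instance

def pvWitness_find_obstructed_seats : List (List Int) := [[1, 5], [2, 3], [4, 0]]

def Spec_find_obstructed_seats (matrix : List (List Int)) (out : List (Int × Int)) : Prop := out = find_obstructed_seats_alt matrix
instance (matrix : List (List Int)) (out : List (Int × Int)) : Decidable (Spec_find_obstructed_seats matrix out) := by unfold Spec_find_obstructed_seats; infer_instance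

-- ===== CLAIM (what is proved, stated in full; the proofs are below) =====
def Claim_equal_find_obstructed_seats : Prop := ∀ (matrix : List (List Int)), Dom_find_obstructed_seats matrix → Pre_find_obstructed_seats matrix → Spec_find_obstructed_seats matrix (find_obstructed_seats matrix)

-- ===== LEMMAS AND PROOFS =====

-- the per-column maximum of a list of rows (none when the list is empty)
def colMax (c : Nat) : List (List Int) → Option Int
  | [] => none
  | row :: rest =>
    match colMax c rest with
    | none => some (row.getD c 0)
    | some m => if row.getD c 0 > m then some (row.getD c 0) else some m

-- common canonical form both ports are reduced to
def canon (cols ri : Nat) : List (List Int) → List (Int × Int)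
  | [] => []
  | row :: rest =>
    (List.range cols).filterMap (fun c =>
      if rest.any (fun r => r.getD c 0 > row.getD c 0) then some ((ri : Int), (c : Int)) else none)
    ++ canon cols (ri + 1) rest

theorem bRec_snd (cols ri : Nat) (rows : List (List Int)) :
    (bRec cols ri rows).2 = (List.range cols).map (fun c => colMax c rows) := by
  induction rows generalizing ri with
  | nil => simp [bRec, colMax, List.map_const']
  | cons row rest ih =>
    simp only [bRec, ih]
    refine List.map_congr_left (fun c hc => ?_)
    rw [List.getD_eq_getElem?_getD, List.getElem?_map,
        List.getElem?_range (List.mem_range.mp hc)]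
    simp [colMax]

theorem colMax_match (c : Nat) (h : Int) (x : Int × Int) (rest : List (List Int)) :
    (match colMax c rest with
     | some m => if m > h then some x else none
     | none => none)
    = (if rest.any (fun r => r.getD c 0 > h) then some x else none) := by
  induction rest with
  | nil => simp [colMax]
  | cons r rs ih =>
    have hstep : colMax c (r :: rs)
        = match colMax c rs with
          | none => some (r.getD c 0)
          | some m => if r.getD c 0 > m then some (r.getD c 0) else some m := rfl
    rw [hstep]
    cases hm : colMax c rs with
    | none =>
      rw [hm] at ih
      rw [List.any_cons]
      have hany : (rs.any fun r => decide (r.getD c 0 > h)) = false := by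
        cases hany : (rs.any fun r => decide (r.getD c 0 > h)) with
        | false => rfl
        | true => rw [hany] at ih; simp at ih
      show (if r.getD c 0 > h then some x else none) = _
      rw [hany, Bool.or_false]
      by_cases hrh : r.getD c 0 > h <;>
        rw [List.getD_eq_getElem?_getD] at hrh <;> simp [hrh]
    | some m =>
      rw [hm] at ih
      rw [List.any_cons]
      have key : (rs.any fun r => decide (r.getD c 0 > h)) = decide (m > h) := by
        cases hany : (rs.any fun r => decide (r.getD c 0 > h)) <;>
          rw [hany] at ih <;> by_cases hmh : m > h <;> simp [hmh] at ih ⊢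
      rw [key]
      show (match (if r.getD c 0 > m then some (r.getD c 0) else some m) with
            | some m' => if m' > h then some x else none
            | none => none) = _
      by_cases hrm : r.getD c 0 > m
      · rw [if_pos hrm]
        show (if r.getD c 0 > h then some x else none) = _
        by_cases hrh : r.getD c 0 > h
        · rw [List.getD_eq_getElem?_getD] at hrh
          simp [hrh]
        · have hmh : ¬ m > h := by omega
          rw [List.getD_eq_getElem?_getD] at hrh
          simp [hrh, hmh]
      · rw [if_neg hrm]
        show (if m > h then some x else none) = _
        by_cases hmh : m > h
        · simp [hmh]
        · have hrh : ¬ r.getD c 0 > h := by omega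
          rw [List.getD_eq_getElem?_getD] at hrh
          simp [hmh, hrh]

theorem bRec_fst (cols ri : Nat) (rows : List (List Int)) :
    (bRec cols ri rows).1 = canon cols ri rows := by
  induction rows generalizing ri with
  | nil => simp [bRec, canon]
  | cons row rest ih =>
    simp only [bRec, canon, ih, bRec_snd]
    congr 1
    refine List.filterMap_congr (fun c hc => ?_)
    rw [List.getD_eq_getElem?_getD, List.getElem?_map,
        List.getElem?_range (List.mem_range.mp hc)]
    simpa using colMax_match c (row.getD c 0) ((ri : Int), (c : Int)) rest

theorem checkA_any (matrix : List (List Int)) (h : Int) (c : Nat) (l : List Nat) :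
    checkA matrix h c l = l.any (fun r => (matrix.getD r []).getD c 0 > h) := by
  induction l with
  | nil => rfl
  | cons r rest ih =>
    by_cases hr : (matrix.getD r []).getD c 0 > h <;> simp [checkA, ih]

theorem any_range'_drop (l : List (List Int)) (c : Nat) (h : Int) :
    ∀ (k a : Nat), a + k = l.length →
      (List.range' a k).any (fun r => (l.getD r []).getD c 0 > h)
        = (l.drop a).any (fun row => row.getD c 0 > h) := by
  intro k
  induction k with
  | zero =>
    intro a ha
    simp [List.drop_of_length_le (by omega : l.length ≤ a)]
  | succ n ih =>
    intro a ha
    have hal : a < l.length := by omega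
    rw [List.range'_succ, List.drop_eq_getElem_cons hal]
    have ih' := ih (a + 1) (by omega)
    simp only [List.getD_eq_getElem?_getD] at ih'
    simp only [List.any_cons, List.getD_eq_getElem?_getD,
      List.getElem?_eq_getElem hal, Option.getD_some, ih']

theorem filter_map_eq_filterMap {α β : Type} (p : α → Bool) (f : α → β) (l : List α) :
    (l.filter p).map f = l.filterMap (fun x => if p x then some (f x) else none) := by
  induction l with
  | nil => rfl
  | cons x xs ih => by_cases hx : p x <;> simp [hx, ih]

theorem canon_flatMap (cols : Nat) (rows : List (List Int)) : ∀ ri : Nat,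
    canon cols ri rows = (List.range rows.length).flatMap (fun i =>
      (List.range cols).filterMap (fun c =>
        if (rows.drop (i + 1)).any (fun r => r.getD c 0 > (rows.getD i []).getD c 0)
        then some (((ri + i : Nat) : Int), (c : Int)) else none)) := by
  induction rows with
  | nil => simp [canon]
  | cons row rest ih =>
    intro ri
    rw [canon, List.length_cons, List.range_succ_eq_map, List.flatMap_cons, List.flatMap_map]
    refine congrArg₂ (· ++ ·) ?_ ?_
    · simp
    · rw [ih (ri + 1)]
      refine List.flatMap_congr (fun i _ => ?_)
      refine List.filterMap_congr (fun c _ => ?_)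
      rw [show ((ri + 1 + i : Nat) : Int) = ((ri + (i + 1) : Nat) : Int) by push_cast; ring]
      simp only [List.drop_succ_cons, List.getD_cons_succ]

theorem A_eq_flatMap (matrix : List (List Int)) :
    find_obstructed_seats matrix
      = (List.range matrix.length).flatMap (fun i =>
          (List.range (matrix.getD 0 []).length).filterMap (fun c =>
            if (matrix.drop (i + 1)).any (fun r => r.getD c 0 > (matrix.getD i []).getD c 0)
            then some ((i : Int), (c : Int)) else none)) := by
  unfold find_obstructed_seats
  simp only []
  have hdr : ∀ m n : Nat, (List.range n).drop m = List.range' m (n - m) := by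
    intro m n; simp [List.range_eq_range', List.drop_range']
  have hinner : ∀ (i : Nat), i < matrix.length → ∀ (acc : List (Int × Int)),
      (List.range (matrix.getD 0 []).length).foldl (fun acc2 col =>
        if checkA matrix ((matrix.getD i []).getD col 0) col
            ((List.range matrix.length).drop (i + 1))
        then acc2 ++ [((i : Int), (col : Int))] else acc2) acc
      = acc ++ (List.range (matrix.getD 0 []).length).filterMap (fun c =>
          if (matrix.drop (i + 1)).any (fun r => r.getD c 0 > (matrix.getD i []).getD c 0)
          then some ((i : Int), (c : Int)) else none) := by
    intro i hi acc
    rw [PySem.List.foldl_append_if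
      (fun col => checkA matrix ((matrix.getD i []).getD col 0) col
        ((List.range matrix.length).drop (i + 1)))
      (fun col => ((i : Int), (col : Int)))]
    rw [filter_map_eq_filterMap]
    congr 1
    refine List.filterMap_congr (fun c _ => ?_)
    rw [checkA_any, hdr,
        any_range'_drop matrix c ((matrix.getD i []).getD c 0)
          (matrix.length - (i + 1)) (i + 1) (by omega)]
  calc (List.range matrix.length).foldl (fun acc i =>
        (List.range (matrix.getD 0 []).length).foldl (fun acc2 col =>
          if checkA matrix ((matrix.getD i []).getD col 0) col
              ((List.range matrix.length).drop (i + 1))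
          then acc2 ++ [((i : Int), (col : Int))] else acc2) acc) []
      = (List.range matrix.length).foldl (fun acc i =>
          acc ++ (List.range (matrix.getD 0 []).length).filterMap (fun c =>
            if (matrix.drop (i + 1)).any (fun r => r.getD c 0 > (matrix.getD i []).getD c 0)
            then some ((i : Int), (c : Int)) else none)) [] := by
        exact PySem.List.foldl_congr_mem _ _ _ _
          (fun acc i hi => hinner i (List.mem_range.mp hi) acc)
    _ = _ := by
        rw [PySem.List.foldl_append_eq_flatMap]
        simp

-- ===== VERDICT (by name: the statement is the Claim_ definition above) =====
theorem find_obstructed_seats_spec : Claim_equal_find_obstructed_seats := by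
  intro matrix _ _
  unfold Spec_find_obstructed_seats find_obstructed_seats_alt
  rw [A_eq_flatMap, bRec_fst, canon_flatMap]
  simp
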